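-- pv_equiv track=rewrite | github.com/ASSERT-KTH/Mokav | experiments/c4b/BADTIE/iteration-10-sample-10-temp1/generated_tests/2766/104854/temp_acc_qb.py | patched_func
-- ===== SOURCE A (Python) =====
-- def patched_func(*args):
-- 	global_list = []
--
-- 	str = args[0]
-- 	index = int((len(str) / 2))
-- 	count = 0
-- 	for i in range(0, index):
-- 	    if (not (str[i] == str[((- i) - 1)])):
-- 	        count += 1
-- 	if (count == 1):
-- 	    global_list.append('YES')
-- 	elif ((count == 0) and ((len(str) % 2) == 1)):
-- 	    global_list.append('YES')
-- 	else:
-- 	    global_list.append('NO')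
-- 	return global_list
-- ===== SOURCE B (Python) =====
-- def patched_func(*args):
--     s = args[0]
--     i, j = 0, len(s) - 1
--     while i < j and s[i] == s[j]:
--         i += 1
--         j -= 1
--     if i >= j:
--         # perfect palindrome: needs a middle character to change
--         return ['YES' if len(s) % 2 == 1 else 'NO']
--     # skip the single allowed mismatch; the rest must mirror exactly
--     i += 1
--     j -= 1
--     while i < j and s[i] == s[j]:
--         i += 1
--         j -= 1
--     return ['YES' if i >= j else 'NO']
-- ===== Notes on version B (the rewrite author's own statement) =====
-- stated objective: alternative
-- what changed: Replaces A's count-all-mirror-mismatches half-loop by an early-exit two-pointer scan that stops at the first mismatch, skips it once, and then only verifies the remaining inner substring is a palindrome (no counter is ever kept; a second mismatch aborts immediately).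
import Mathlib
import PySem

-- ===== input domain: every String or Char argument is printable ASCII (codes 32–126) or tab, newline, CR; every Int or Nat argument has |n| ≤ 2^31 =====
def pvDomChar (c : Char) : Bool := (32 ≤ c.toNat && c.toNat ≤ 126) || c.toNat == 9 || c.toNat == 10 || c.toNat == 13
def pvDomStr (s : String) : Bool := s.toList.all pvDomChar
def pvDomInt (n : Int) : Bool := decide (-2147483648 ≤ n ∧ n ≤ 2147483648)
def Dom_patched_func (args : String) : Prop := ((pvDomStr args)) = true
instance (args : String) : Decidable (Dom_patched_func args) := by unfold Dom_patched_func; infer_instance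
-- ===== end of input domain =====

-- B replaces A's count-all-mirror-mismatches half-loop by an early-exit two-pointer scan
-- that stops at the first mismatch, skips it once, and only verifies the rest mirrors
-- (alternative decomposition, same worst-case O(n) cost).

-- ===== PORT A =====
-- int(len(s)/2): true division then truncation; the length is nonnegative, so this is floor division.
def patched_func (args : String) : List String :=
  let s := args
  let index : Int := PySem.Int.floordiv (PySem.Str.len s) 2
  let count : Int := (PySem.List.pyRange 0 index 1).foldl
    (fun c i => if ¬ (PySem.Str.pyGet? s i = PySem.Str.pyGet? s (-i - 1)) then c + 1 else c) 0
  if count = 1 then ["YES"]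
  else if count = 0 ∧ PySem.Int.mod (PySem.Str.len s) 2 = 1 then ["YES"]
  else ["NO"]

-- ===== PORT B =====
-- the two-pointer loop 'while i < j and s[i] == s[j]: i += 1; j -= 1', returning the final (i, j);
-- both indices are in range whenever dereferenced, so getD is exact.
def pvScan (l : List Char) (i j : Int) : Int × Int :=
  if h : i < j ∧ l.getD i.toNat 'a' = l.getD j.toNat 'a'
  then pvScan l (i + 1) (j - 1)
  else (i, j)
termination_by (j - i).toNat
decreasing_by omega

def patched_func_alt (args : String) : List String :=
  let l := args.toList
  let p := pvScan l 0 ((l.length : Int) - 1)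
  if p.1 ≥ p.2 then (if l.length % 2 = 1 then ["YES"] else ["NO"])
  else
    let q := pvScan l (p.1 + 1) (p.2 - 1)
    if q.1 ≥ q.2 then ["YES"] else ["NO"]

-- ===== PRECONDITION & SPEC =====
def Spec_patched_func (args : String) (out : List String) : Prop := out = patched_func_alt args
instance (args : String) (out : List String) : Decidable (Spec_patched_func args out) := by unfold Spec_patched_func; infer_instance

-- ===== CLAIM (what is proved, stated in full; the proofs are below) =====
def Claim_equal_patched_func : Prop := ∀ (args : String), Dom_patched_func args → Spec_patched_func args (patched_func args)

-- ===== LEMMAS AND PROOFS =====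

-- the mirror-mismatch indicator at index k
def pvG (l : List Char) (k : Nat) : Bool := l.getD k 'a' != l.getD (l.length - 1 - k) 'a'

-- countP over List.range as a Finset sum
theorem pv_countP_range_eq_sum (g : ℕ → Bool) (m : ℕ) :
    List.countP g (List.range m) = ∑ i ∈ Finset.range m, (if g i then 1 else 0) := by
  induction m with
  | zero => simp
  | succ m ih =>
    rw [List.range_succ, List.countP_append, Finset.sum_range_succ, ih]
    simp [List.countP_cons]

-- the scan with invariant j = n-1-i passes over only matching positions and stops at n/2
theorem pvScan_clean (l : List Char) (i : Nat) (hi : i ≤ l.length / 2)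
    (h : ∀ k, i ≤ k → k < l.length / 2 → pvG l k = false) :
    pvScan l i ((l.length : Int) - 1 - i) =
      (((l.length / 2 : Nat) : Int), (l.length : Int) - 1 - ((l.length / 2 : Nat) : Int)) := by
  rcases Nat.lt_or_ge i (l.length / 2) with hlt | hge
  · have hcond : (i : Int) < (l.length : Int) - 1 - i := by omega
    have heq : l.getD i 'a' = l.getD (l.length - 1 - i) 'a' := by
      have := h i le_rfl hlt
      simpa [pvG, bne_eq_false_iff_eq] using this
    rw [pvScan]
    have ht : ((i : Int)).toNat = i := by omega
    have ht2 : ((l.length : Int) - 1 - (i : Int)).toNat = l.length - 1 - i := by omega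
    rw [dif_pos (by rw [ht, ht2]; exact ⟨hcond, heq⟩)]
    have harg : ((l.length : Int) - 1 - (i : Int)) - 1 = (l.length : Int) - 1 - ((i + 1 : Nat) : Int) := by
      push_cast; ring
    rw [harg]
    have := pvScan_clean l (i + 1) (by omega) (fun k hk1 hk2 => h k (by omega) hk2)
    simpa using this
  · have hieq : i = l.length / 2 := le_antisymm hi hge
    rw [pvScan, dif_neg]
    · rw [hieq]
    · rintro ⟨hc, -⟩
      omega
termination_by l.length / 2 - i

-- the scan with invariant j = n-1-i stops at the first mismatching position
theorem pvScan_hit (l : List Char) (i k0 : Nat) (hik : i ≤ k0) (hk : k0 < l.length / 2)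
    (hg : pvG l k0 = true) (h : ∀ k, i ≤ k → k < k0 → pvG l k = false) :
    pvScan l i ((l.length : Int) - 1 - i) = ((k0 : Int), (l.length : Int) - 1 - (k0 : Int)) := by
  rcases Nat.lt_or_ge i k0 with hlt | hge
  · have hcond : (i : Int) < (l.length : Int) - 1 - i := by omega
    have heq : l.getD i 'a' = l.getD (l.length - 1 - i) 'a' := by
      have := h i le_rfl hlt
      simpa [pvG, bne_eq_false_iff_eq] using this
    rw [pvScan]
    have ht : ((i : Int)).toNat = i := by omega
    have ht2 : ((l.length : Int) - 1 - (i : Int)).toNat = l.length - 1 - i := by omega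
    rw [dif_pos (by rw [ht, ht2]; exact ⟨hcond, heq⟩)]
    have harg : ((l.length : Int) - 1 - (i : Int)) - 1 = (l.length : Int) - 1 - ((i + 1 : Nat) : Int) := by
      push_cast; ring
    rw [harg]
    exact pvScan_hit l (i + 1) k0 (by omega) hk hg (fun k hk1 hk2 => h k (by omega) hk2)
  · have hieq : i = k0 := le_antisymm hik hge
    subst hieq
    rw [pvScan, dif_neg]
    rintro ⟨-, hc⟩
    have ht : ((i : Int)).toNat = i := by omega
    have ht2 : ((l.length : Int) - 1 - (i : Int)).toNat = l.length - 1 - i := by omega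
    rw [ht, ht2] at hc
    have hfalse : pvG l i = false := by unfold pvG; rw [hc]; simp
    rw [hfalse] at hg
    cases hg
termination_by k0 - i

-- A's loop computes the mirror-mismatch count over the half range
theorem pvA_count (args : String) :
    ((PySem.List.pyRange 0 ((args.toList.length / 2 : ℕ) : Int) 1).foldl
      (fun c i => if ¬ (PySem.Str.pyGet? args i = PySem.Str.pyGet? args (-i - 1)) then c + 1 else c)
      (0 : Int)) = ((List.countP (pvG args.toList) (List.range (args.toList.length / 2)) : ℕ) : Int) := by
  set l := args.toList with hl
  rw [PySem.List.foldl_ite_add_one, PySem.List.pyRange_one, List.countP_map, zero_add]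
  have hlen : ((((l.length / 2 : ℕ) : Int) - 0).toNat) = l.length / 2 := by omega
  rw [hlen]
  congr 1
  apply List.countP_congr
  intro k hk
  rw [List.mem_range] at hk
  have hkn : k < l.length := by omega
  simp only [Function.comp_apply]
  have hget1 : PySem.Str.pyGet? args ((0 : Int) + (k : ℕ)) = some (l.getD k 'a') := by
    rw [zero_add, PySem.Str.pyGet?_natCast, ← hl,
      List.getElem?_eq_getElem hkn, List.getD_eq_getElem l 'a' hkn]
  have hneg : (-(((0 : Int) + (k : ℕ))) - 1) = -(((k + 1 : ℕ) : Int)) := by push_cast; ring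
  have hget2 : PySem.Str.pyGet? args (-(((0 : Int) + (k : ℕ))) - 1) = some (l.getD (l.length - 1 - k) 'a') := by
    rw [hneg]
    show PySem.List.pyGet? l (-(((k + 1 : ℕ) : Int))) = _
    rw [PySem.List.pyGet?_neg_natCast _ _ (by omega) (by omega)]
    have h2 : l.length - (k + 1) < l.length := by omega
    have h3 : l.length - 1 - k = l.length - (k + 1) := by omega
    rw [List.getElem?_eq_getElem h2, h3, List.getD_eq_getElem l 'a' h2]
  rw [hget1, hget2]
  unfold pvG
  by_cases h : l.getD k 'a' = l.getD (l.length - 1 - k) 'a'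
  · simp only [h]
    simp
  · simp only [List.getD] at h ⊢
    simp [h]

theorem patched_func_spec : Claim_equal_patched_func := by
  intro args _
  unfold Spec_patched_func patched_func patched_func_alt
  simp only []
  set l := args.toList with hl
  set n := l.length with hn
  set g : ℕ → Bool := pvG l with hg
  set c : ℕ := List.countP g (List.range (n / 2)) with hc
  -- A's index int(len/2) and parity test
  have hidx : PySem.Int.floordiv (PySem.Str.len args) 2 = ((n / 2 : ℕ) : Int) := by
    rw [PySem.Str.len_eq]
    exact_mod_cast PySem.Int.floordiv_natCast n 2
  have hmod : PySem.Int.mod (PySem.Str.len args) 2 = ((n % 2 : ℕ) : Int) := by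
    rw [PySem.Str.len_eq]
    exact_mod_cast PySem.Int.mod_natCast n 2
  have hcount := pvA_count args
  rw [← hl, ← hn, ← hg, ← hc] at hcount
  rw [hidx, hmod, hcount]
  by_cases hc0 : c = 0
  · -- no mismatch: first scan crosses; both return the parity answer
    have hall : ∀ k, (0 : ℕ) ≤ k → k < n / 2 → g k = false := by
      intro k _ hk
      have h0 : List.countP g (List.range (n / 2)) = 0 := by rw [← hc]; exact hc0
      have := List.countP_eq_zero.mp h0 k (List.mem_range.mpr hk)
      simpa using this
    have hscan : pvScan l 0 ((l.length : Int) - 1) =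
        (((l.length / 2 : Nat) : Int), (l.length : Int) - 1 - ((l.length / 2 : Nat) : Int)) := by
      simpa using pvScan_clean l 0 (Nat.zero_le _) hall
    rw [← hn] at hscan
    rw [hscan]
    have hcross : ((n / 2 : ℕ) : Int) ≥ (n : Int) - 1 - ((n / 2 : ℕ) : Int) := by omega
    rw [if_pos hcross, hc0]
    by_cases hodd : n % 2 = 1
    · rw [if_pos hodd, if_neg (by norm_num), if_pos ⟨rfl, by rw [hodd]; exact Nat.cast_one⟩]
    · rw [if_neg hodd, if_neg (by norm_num), if_neg]
      rintro ⟨-, hp⟩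
      exact hodd (by exact_mod_cast hp)
  · -- there is a mismatch: first scan stops at the least one, k0
    have hex : ∃ k, k < n / 2 ∧ g k = true := by
      by_contra hno
      push_neg at hno
      apply hc0
      rw [hc]
      apply List.countP_eq_zero.mpr
      intro a ha
      simpa using hno a (List.mem_range.mp ha)
    classical
    let k0 := Nat.find hex
    obtain ⟨hk0lt, hk0g⟩ : k0 < n / 2 ∧ g k0 = true := Nat.find_spec hex
    have hk0min : ∀ k, k < k0 → g k = false := by
      intro k hk
      by_contra hkk
      exact Nat.find_min hex hk ⟨by omega, by simpa using hkk⟩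
    have hscan1 : pvScan l 0 ((l.length : Int) - 1) = ((k0 : Int), (l.length : Int) - 1 - (k0 : Int)) := by
      simpa using pvScan_hit l 0 k0 (Nat.zero_le _) hk0lt hk0g (fun k _ hk2 => hk0min k hk2)
    rw [← hn] at hscan1
    rw [hscan1]
    have hnotcross : ¬ ((k0 : Int) ≥ (n : Int) - 1 - (k0 : Int)) := by omega
    rw [if_neg hnotcross]
    by_cases hc1 : c = 1
    · -- exactly one mismatch: second scan crosses; both say YES
      have hrest : ∀ k, k0 + 1 ≤ k → k < n / 2 → g k = false := by
        intro k hk1 hk2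
        by_contra hkk
        have hkg : g k = true := by simpa using hkk
        have hk0k : k0 ≠ k := by omega
        have h2le : 2 ≤ List.countP g (List.range (n / 2)) := by
          rw [pv_countP_range_eq_sum]
          have hsub : ({k0, k} : Finset ℕ) ⊆ Finset.range (n / 2) := by
            intro x hx
            rw [Finset.mem_insert, Finset.mem_singleton] at hx
            rcases hx with h | h <;> subst h <;> exact Finset.mem_range.mpr (by omega)
          calc (2 : ℕ) = ∑ i ∈ ({k0, k} : Finset ℕ), (if g i then 1 else 0) := by
                rw [Finset.sum_pair hk0k, if_pos hk0g, if_pos hkg]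
            _ ≤ _ := Finset.sum_le_sum_of_subset_of_nonneg hsub (fun _ _ _ => by positivity)
        omega
      have hscan2 := pvScan_clean l (k0 + 1) (by omega) hrest
      simp only [Nat.cast_add, Nat.cast_one] at hscan2
      rw [← hn] at hscan2
      have hstart2 : ((n : Int) - 1 - (k0 : Int)) - 1 = (n : Int) - 1 - ((k0 : Int) + 1) := by ring
      rw [hstart2, hscan2]
      have hcross2 : ((n / 2 : ℕ) : Int) ≥ (n : Int) - 1 - ((n / 2 : ℕ) : Int) := by omega
      rw [if_pos hcross2, if_pos (by exact_mod_cast congrArg (Nat.cast : ℕ → ℤ) hc1)]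
    · -- at least two mismatches: second scan stops before crossing; both say NO
      have hex2 : ∃ k, k0 < k ∧ k < n / 2 ∧ g k = true := by
        by_contra hno
        push_neg at hno
        have hle1 : List.countP g (List.range (n / 2)) ≤ 1 := by
          rw [pv_countP_range_eq_sum]
          calc (∑ i ∈ Finset.range (n / 2), (if g i then 1 else 0))
              ≤ ∑ i ∈ Finset.range (n / 2), (if i = k0 then 1 else 0) := by
                apply Finset.sum_le_sum
                intro i hi
                rcases Nat.lt_trichotomy i k0 with h | h | h
                · simp [hk0min i h]
                · subst h; simp [hk0g]
                · have hgi : g i = false := by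
                    by_contra hgg
                    exact hno i h (List.mem_range.mp hi) (by simpa using hgg)
                  simp [hgi]
            _ = 1 := by
                rw [Finset.sum_ite_eq' (Finset.range (n / 2)) k0 (fun _ => 1)]
                rw [if_pos (Finset.mem_range.mpr hk0lt)]
        omega
      classical
      let k1 := Nat.find hex2
      obtain ⟨hk1gt, hk1lt, hk1g⟩ : k0 < k1 ∧ k1 < n / 2 ∧ g k1 = true := Nat.find_spec hex2
      have hk1min : ∀ k, k0 + 1 ≤ k → k < k1 → g k = false := by
        intro k hk1' hk2
        by_contra hkk
        exact Nat.find_min hex2 hk2 ⟨by omega, by omega, by simpa using hkk⟩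
      have hscan2 := pvScan_hit l (k0 + 1) k1 (by omega) hk1lt hk1g hk1min
      simp only [Nat.cast_add, Nat.cast_one] at hscan2
      rw [← hn] at hscan2
      have hstart2 : ((n : Int) - 1 - (k0 : Int)) - 1 = (n : Int) - 1 - ((k0 : Int) + 1) := by ring
      rw [hstart2, hscan2]
      have hnotcross2 : ¬ ((k1 : Int) ≥ (n : Int) - 1 - (k1 : Int)) := by omega
      rw [if_neg hnotcross2, if_neg, if_neg]
      · rintro ⟨hp, -⟩
        exact hc0 (by exact_mod_cast hp)
      · intro hp
        exact hc1 (by exact_mod_cast hp)
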